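-- pv_equiv track=rewrite | github.com/kubraaksux/Efficiency-Insight | algorithm_analysis.py | execute_algorithm
-- ===== SOURCE A (Python) =====
-- def execute_algorithm(arr):
--     # Implemented to match the logic described in the pseudocode.
--     # Counts the number of operations based on specific conditions encountered in the array.
--     # arr -> The input array containing 0s, 1s, and 2s.
--     # n -> The length of the input array.
--     # y -> Return statement that counts the number of operations performed.
--
--     y = 0
--     n = len(arr)
--
--     for i in range(n):
--         if arr[i] == 0:
--             for j in range(i, n):
--                 y += 1
--                 k = n
--                 while k > 0:
--                     k = k // 3
--                     y += 1
--         elif arr[i] == 1: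
--             for m in range(i, n):
--                 y += 1
--                 for l in range(m, n):
--                     for t in range(n, 0, -1):
--                         z = n
--                         while z > 0:
--                             y += 1
--                             z -= t
--         else:  # arr[i] is 2
--             y += 1
--             p = 0
--             while p < n:
--                 for j in range(p ** 2):
--                     y += 1
--                 p += 1
--
--     return y
-- ===== SOURCE B (Python) =====
-- def execute_algorithm(arr):
--     # Closed-form per-element contributions: precompute the while-k//3 depth,
--     # the harmonic-like ceiling sum S, and the sum-of-squares constant once,
--     # then add one O(1) term per element.
--     n = len(arr)
--     t3 = 0
--     k = n
--     while k > 0: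
--         k = k // 3
--         t3 += 1
--     s = sum(-(-n // t) for t in range(1, n + 1))
--     zero_c = 1 + t3
--     two_c = 1 + (n - 1) * n * (2 * n - 1) // 6
--     y = 0
--     for i in range(n):
--         r = n - i
--         if arr[i] == 0:
--             y += r * zero_c
--         elif arr[i] == 1:
--             y += r + s * (r * (r + 1) // 2)
--         else:
--             y += two_c
--     return y
-- ===== Notes on version B (the rewrite author's own statement) =====
-- stated objective: faster
-- what changed: Replaces the nested counting loops by closed-form per-element contributions: the k//3 depth, the ceiling-division sum S, and the sum-of-squares constant are precomputed once and each element adds an O(1) term.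
import Mathlib
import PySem

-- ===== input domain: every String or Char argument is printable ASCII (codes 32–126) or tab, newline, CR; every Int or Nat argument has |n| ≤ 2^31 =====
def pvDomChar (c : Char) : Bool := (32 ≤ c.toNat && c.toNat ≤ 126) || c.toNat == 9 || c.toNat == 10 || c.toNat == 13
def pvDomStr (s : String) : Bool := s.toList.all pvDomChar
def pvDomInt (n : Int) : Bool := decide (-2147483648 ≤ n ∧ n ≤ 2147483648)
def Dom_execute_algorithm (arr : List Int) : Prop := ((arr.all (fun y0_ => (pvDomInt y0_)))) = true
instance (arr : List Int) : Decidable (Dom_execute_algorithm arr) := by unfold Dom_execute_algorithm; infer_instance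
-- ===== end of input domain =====

-- B replaces A's nested counting loops by precomputed closed-form per-element contributions (measured asymptotically faster).

-- ===== PORT A =====
-- 'k = n; while k > 0: k = k // 3; y += 1' — number of iterations
def loopK (k : Int) : Int :=
  if h : 0 < k then 1 + loopK (PySem.Int.floordiv k 3) else 0
termination_by k.toNat
decreasing_by
  rw [PySem.Int.floordiv_eq_ediv_of_pos (by omega)]; omega

-- 'z = n; while z > 0: y += 1; z -= t' — iterations counted; the '0 < t' guard
-- only makes the recursion total (Python diverges for t ≤ 0; A only calls it with t ≥ 1)
def loopZ (z t : Int) : Int :=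
  if hz : 0 < z then (if ht : 0 < t then 1 + loopZ (z - t) t else 0) else 0
termination_by z.toNat
decreasing_by omega

-- 'p = 0; while p < n: for j in range(p ** 2): y += 1; p += 1'
def loopP (p n y : Int) : Int :=
  if h : p < n then
    loopP (p + 1) n ((PySem.List.pyRange 0 (p * p) 1).foldl (fun a _j => a + 1) y)
  else y
termination_by (n - p).toNat
decreasing_by omega

def execute_algorithm (arr : List Int) : Int :=
  let n : Int := arr.length
  (PySem.List.pyRange 0 n 1).foldl (fun y i =>
    if PySem.List.pyGetD arr i 0 = 0 then
      (PySem.List.pyRange i n 1).foldl (fun y _j => (y + 1) + loopK n) y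
    else if PySem.List.pyGetD arr i 0 = 1 then
      (PySem.List.pyRange i n 1).foldl (fun y m =>
        (PySem.List.pyRange m n 1).foldl (fun y _l =>
          (PySem.List.pyRange n 0 (-1)).foldl (fun y t => y + loopZ n t) y) (y + 1)) y
    else
      loopP 0 n (y + 1)) 0

-- ===== PORT B =====
-- 't3 = 0; k = n; while k > 0: k = k // 3; t3 += 1'
def t3loop (k : Int) : Int :=
  if h : 0 < k then 1 + t3loop (PySem.Int.floordiv k 3) else 0
termination_by k.toNat
decreasing_by
  rw [PySem.Int.floordiv_eq_ediv_of_pos (by omega)]; omega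

def execute_algorithm_alt (arr : List Int) : Int :=
  let n : Int := arr.length
  let t3 := t3loop n
  let s := ((PySem.List.pyRange 1 (n + 1) 1).map (fun t => -(PySem.Int.floordiv (-n) t))).sum
  let zero_c := 1 + t3
  let two_c := 1 + PySem.Int.floordiv ((n - 1) * n * (2 * n - 1)) 6
  (PySem.List.pyRange 0 n 1).foldl (fun y i =>
    let r := n - i
    if PySem.List.pyGetD arr i 0 = 0 then y + r * zero_c
    else if PySem.List.pyGetD arr i 0 = 1 then
      y + (r + s * PySem.Int.floordiv (r * (r + 1)) 2)
    else y + two_c) 0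

-- ===== PRECONDITION & SPEC =====
def Spec_execute_algorithm (arr : List Int) (out : Int) : Prop := out = execute_algorithm_alt arr
instance (arr : List Int) (out : Int) : Decidable (Spec_execute_algorithm arr out) := by unfold Spec_execute_algorithm; infer_instance

-- ===== CLAIM (what is proved, stated in full; the proofs are below) =====
def Claim_equal_execute_algorithm : Prop := ∀ (arr : List Int), Dom_execute_algorithm arr → Spec_execute_algorithm arr (execute_algorithm arr)

-- ===== LEMMAS AND PROOFS =====

theorem loopK_eq_t3loop (k : Int) : loopK k = t3loop k := by
  fun_induction loopK k with
  | case1 k h ih =>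
    rw [loopK, t3loop, dif_pos h, ← loopK.eq_def, ih]
  | case2 k h =>
    rw [t3loop.eq_def, dif_neg h]

theorem loopZ_bracket (z t : Int) (ht : 0 < t) (hz : 0 < z) :
    (loopZ z t - 1) * t < z ∧ z ≤ loopZ z t * t := by
  fun_induction loopZ z t with
  | case1 z hz1 ht1 ih =>
    by_cases h : 0 < z - t
    · have := ih h
      constructor <;> nlinarith [this.1, this.2]
    · have hc : loopZ (z - t) t = 0 := by rw [loopZ, dif_neg h]
      rw [hc]
      constructor <;> nlinarith
  | case2 z hz1 ht1 => omega
  | case3 z hz1 => omega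
theorem loopZ_eq_ceil (z t : Int) (ht : 0 < t) (hz : 0 ≤ z) :
    loopZ z t = -(PySem.Int.floordiv (-z) t) := by
  by_cases h : 0 < z
  · have hb := loopZ_bracket z t ht h
    rw [eq_comm, PySem.Int.neg_floordiv_neg_eq_iff_of_pos ht]
    exact hb
  · have hz0 : z = 0 := by omega
    subst hz0
    rw [loopZ]; simp only [lt_irrefl, dite_false]
    rw [eq_comm, neg_eq_zero, PySem.Int.floordiv_eq_iff_of_pos ht]
    omega

-- constant-body fold: each element adds c
theorem foldl_const_add (l : List Int) (c y : Int) :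
    l.foldl (fun a (_ : Int) => a + c) y = y + (l.length : Int) * c := by
  rw [PySem.List.foldl_add (g := fun _ => c)]
  rw [PySem.List.sum_map_const_int]

-- the t-loop of branch 1: equals B's precomputed sum s
theorem tfold_eq (n y : Int) (hn : 0 ≤ n) :
    (PySem.List.pyRange n 0 (-1)).foldl (fun y t => y + loopZ n t) y
      = y + ((PySem.List.pyRange 1 (n + 1) 1).map (fun t => -(PySem.Int.floordiv (-n) t))).sum := by
  rw [PySem.List.foldl_add (g := fun t => loopZ n t)]
  congr 1
  rw [PySem.List.pyRange_neg_one_eq_reverse]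
  simp only [zero_add]
  rw [List.map_reverse, List.sum_reverse]
  congr 1
  apply List.map_congr_left
  intro t htmem
  have := (PySem.List.mem_pyRange_one).mp htmem
  exact loopZ_eq_ceil n t (by omega) hn

-- arithmetic sum: Σ_{m=i}^{n-1} (n-m), doubled
theorem sum_nm (n : Int) : ∀ (i : Int), i ≤ n →
    2 * ((PySem.List.pyRange i n 1).map (fun m => n - m)).sum = (n - i) * (n - i + 1) := by
  intro i hi
  induction hni : (n - i).toNat generalizing i with
  | zero =>
    have : i = n := by omega
    subst this
    rw [PySem.List.pyRange_one_eq_nil (by omega)]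
    simp
  | succ d ih =>
    have hlt : i < n := by omega
    rw [PySem.List.pyRange_one_cons hlt]
    simp only [List.map_cons, List.sum_cons]
    have := ih (i + 1) (by omega) (by omega)
    nlinarith [this]

theorem floordiv_of_double (a q : Int) (h : 2 * q = a) : PySem.Int.floordiv a 2 = q := by
  rw [PySem.Int.floordiv_eq_iff_of_pos (by omega)]
  omega

-- branch 2: the while-p loop adds the sum-of-squares closed form
theorem loopP_eq (n : Int) : ∀ (p y : Int), 0 ≤ p → p ≤ n →
    6 * (loopP p n y - y) = (n - 1) * n * (2 * n - 1) - (p - 1) * p * (2 * p - 1) := by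
  intro p y hp hpn
  induction hnp : (n - p).toNat generalizing p y with
  | zero =>
    have : p = n := by omega
    subst this
    rw [loopP]; simp only [lt_irrefl, dite_false]
    ring
  | succ d ih =>
    have hlt : p < n := by omega
    rw [loopP]; simp only [hlt, dite_true]
    rw [foldl_const_add, PySem.List.length_pyRange_one]
    have hcast : (((p * p - 0).toNat : Int)) = p * p := by
      have : 0 ≤ p * p := by positivity
      omega
    rw [hcast]
    have := ih (p + 1) (y + p * p * 1) (by omega) (by omega) (by omega)
    nlinarith [this]

theorem floordiv_of_six (a q : Int) (h : 6 * q = a) : PySem.Int.floordiv a 6 = q := by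
  rw [PySem.Int.floordiv_eq_iff_of_pos (by omega)]
  omega

theorem execute_algorithm_spec : Claim_equal_execute_algorithm := by
  intro arr _
  unfold Spec_execute_algorithm execute_algorithm execute_algorithm_alt
  simp only []
  set n : Int := (arr.length : Int) with hn
  have hn0 : 0 ≤ n := by simp [hn]
  set s : Int := ((PySem.List.pyRange 1 (n + 1) 1).map (fun t => -(PySem.Int.floordiv (-n) t))).sum with hs
  apply PySem.List.foldl_congr_mem
  intro y i hi
  have hir := (PySem.List.mem_pyRange_one).mp hi
  have hin : i < n := hir.2
  have hi0 : 0 ≤ i := hir.1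
  by_cases h0 : PySem.List.pyGetD arr i 0 = 0
  · simp only [h0, if_true]
    have hbody : (PySem.List.pyRange i n 1).foldl (fun y (_j : Int) => (y + 1) + loopK n) y
        = (PySem.List.pyRange i n 1).foldl (fun y (_j : Int) => y + (1 + loopK n)) y := by
      apply PySem.List.foldl_congr_mem
      intro a x _; ring
    rw [hbody, foldl_const_add, PySem.List.length_pyRange_one]
    rw [loopK_eq_t3loop]
    have hc : (((n - i).toNat : Int)) = n - i := by omega
    rw [hc]
  · simp only [h0, if_false]
    by_cases h1 : PySem.List.pyGetD arr i 0 = 1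
    · simp only [h1, if_true]
      have hbody : (PySem.List.pyRange i n 1).foldl (fun y m =>
          (PySem.List.pyRange m n 1).foldl (fun y (_l : Int) =>
            (PySem.List.pyRange n 0 (-1)).foldl (fun y t => y + loopZ n t) y) (y + 1)) y
          = (PySem.List.pyRange i n 1).foldl (fun y m => y + (1 + (n - m) * s)) y := by
        apply PySem.List.foldl_congr_mem
        intro a m hm
        have hmr := (PySem.List.mem_pyRange_one).mp hm
        have hinner : (PySem.List.pyRange m n 1).foldl (fun y (_l : Int) =>
            (PySem.List.pyRange n 0 (-1)).foldl (fun y t => y + loopZ n t) y) (a + 1)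
            = (PySem.List.pyRange m n 1).foldl (fun y (_l : Int) => y + s) (a + 1) := by
          apply PySem.List.foldl_congr_mem
          intro b x _
          rw [tfold_eq n b hn0, ← hs]
        rw [hinner, foldl_const_add, PySem.List.length_pyRange_one]
        have hc : (((n - m).toNat : Int)) = n - m := by omega
        rw [hc]; ring
      rw [hbody]
      rw [PySem.List.foldl_add (g := fun m => 1 + (n - m) * s)]
      congr 1
      have hsplit : ((PySem.List.pyRange i n 1).map (fun m => 1 + (n - m) * s)).sum
          = ((PySem.List.pyRange i n 1).map (fun _m => (1 : Int))).sum
            + ((PySem.List.pyRange i n 1).map (fun m => (n - m) * s)).sum := by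
        rw [← PySem.List.sum_map_add_int]
      rw [hsplit, PySem.List.sum_map_const_int, PySem.List.length_pyRange_one]
      have h1s : (((n - i).toNat : Int)) * 1 = n - i := by omega
      rw [h1s]
      congr 1
      have hmul : ((PySem.List.pyRange i n 1).map (fun m => (n - m) * s)).sum
          = ((PySem.List.pyRange i n 1).map (fun m => n - m)).sum * s := by
        rw [← List.sum_map_mul_right]
      rw [hmul]
      have hsum := sum_nm n i (by omega)
      rw [floordiv_of_double ((n - i) * (n - i + 1)) _ (by linarith [hsum])]
      ring
    · simp only [h1, if_false]
      have h6 := loopP_eq n 0 (y + 1) (by omega) hn0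
      have : loopP 0 n (y + 1) = (y + 1) + ((loopP 0 n (y + 1)) - (y + 1)) := by ring
      rw [this]
      rw [floordiv_of_six _ (loopP 0 n (y + 1) - (y + 1)) (by linarith [h6])]
      ring
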